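-- pv_equiv track=rewrite | github.com/rajeshmr/yodel-etl | extract_chat_qa_tsv.py | extract_first_qa_from_session
-- ===== SOURCE A (Python) =====
-- from typing import Optional, List
--
-- def safe_text(s: Optional[str]) -> str:
--     """Normalize message text so TSV stays valid: replace newlines/tabs with spaces and strip."""
--     if s is None:
--         return ""
--     if not isinstance(s, str):
--         s = str(s)
--     return s.replace("\t", " ").replace("\r", " ").replace("\n", " ").strip()
--
-- def extract_first_qa_from_session(session: dict) -> (str, str):
--     """Given a session dict, remove leading assistant greeting (if present),
--     then return tuple (user_question, assistant_response).
--
--     Strategy: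
--     - If the first message has role 'assistant', drop it (assumed greeting).
--     - Find the first message with role 'user' -> user_question.
--     - Collect the following assistant messages (one or more contiguous) as assistant_response.
--     - Normalize and return both strings.
--     """
--     messages = session.get("messages") or []
--     if isinstance(messages, dict):
--         messages = list(messages.values())
--
--     # Normalize message roles and contents
--     msgs = []
--     for m in messages:
--         role = m.get("role") or m.get("type") or ""
--         content = m.get("content")
--         msgs.append({"role": role, "content": content})
--
--     # Remove first assistant greeting if it's the very first message
--     if msgs and msgs[0]["role"] == "assistant":
--         msgs = msgs[1:]
--
--     # Find first user message
--     user_idx = None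
--     for i, m in enumerate(msgs):
--         if m["role"] == "user":
--             user_idx = i
--             break
--
--     if user_idx is None:
--         return ("", "")
--
--     user_q = safe_text(msgs[user_idx]["content"])
--
--     # Find assistant messages immediately after user_idx
--     assistant_parts: List[str] = []
--     j = user_idx + 1
--     while j < len(msgs) and msgs[j]["role"] == "assistant":
--         assistant_parts.append(safe_text(msgs[j]["content"]))
--         j += 1
--
--     assistant_resp = " ".join([p for p in assistant_parts if p])
--     return (user_q, assistant_resp)
-- ===== SOURCE B (Python) =====
-- from typing import Optional
--
-- def safe_text(s: Optional[str]) -> str: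
--     if s is None:
--         return ""
--     if not isinstance(s, str):
--         s = str(s)
--     return s.replace("\t", " ").replace("\r", " ").replace("\n", " ").strip()
--
-- def extract_first_qa_from_session(session: dict) -> (str, str):
--     """Single pass: skip until the first user message, take it as the question,
--     then accumulate the immediately following assistant messages as the answer."""
--     messages = session.get("messages") or []
--     if isinstance(messages, dict):
--         messages = list(messages.values())
--     user_q = None
--     parts = []
--     for m in messages:
--         role = m.get("role") or m.get("type") or ""
--         if user_q is None:
--             if role == "user":
--                 user_q = safe_text(m.get("content"))
--         elif role == "assistant":
--             t = safe_text(m.get("content"))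
--             if t:
--                 parts.append(t)
--         else:
--             break
--     if user_q is None:
--         return ("", "")
--     return (user_q, " ".join(parts))
-- ===== Notes on version B (the rewrite author's own statement) =====
-- stated objective: simpler
-- what changed: Replaces A's normalize-pass, greeting-drop, index-based first-user scan and index while-loop with one state-machine pass over the raw messages (no intermediate normalized list, no indices); the leading-greeting drop is provably redundant and omitted.
import Mathlib
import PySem

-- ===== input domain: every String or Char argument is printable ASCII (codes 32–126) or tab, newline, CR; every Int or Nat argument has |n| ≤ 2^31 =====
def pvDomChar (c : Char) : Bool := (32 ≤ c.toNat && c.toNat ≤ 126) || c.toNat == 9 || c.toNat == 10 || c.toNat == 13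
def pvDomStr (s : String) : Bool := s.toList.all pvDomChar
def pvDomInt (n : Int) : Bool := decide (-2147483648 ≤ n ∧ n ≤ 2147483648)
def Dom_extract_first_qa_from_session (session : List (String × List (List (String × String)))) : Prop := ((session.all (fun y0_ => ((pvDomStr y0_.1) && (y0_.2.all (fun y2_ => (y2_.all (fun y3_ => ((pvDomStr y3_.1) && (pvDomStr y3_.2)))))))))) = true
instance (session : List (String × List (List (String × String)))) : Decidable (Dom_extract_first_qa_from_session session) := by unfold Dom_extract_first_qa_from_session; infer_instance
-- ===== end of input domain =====

-- B is a single state-machine pass over the raw messages (no normalized copy, no indices); objective: simpler.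

-- shared module helper safe_text (Python's safe_text)
def safe_text (s : Option String) : String :=
  match s with
  | none => ""
  | some s => PySem.Str.strip (PySem.Str.replace (PySem.Str.replace (PySem.Str.replace s "\t" " ") "\r" " ") "\n" " ")

-- m.get("role") or m.get("type") or ""  (identical expression in both Pythons)
def roleOf (m : List (String × String)) : String :=
  let r := (List.lookup "role" m).getD ""
  if r ≠ "" then r else (List.lookup "type" m).getD ""

-- ===== PORT A =====
-- for i, m in enumerate(msgs): if role == 'user': user_idx = i; break
def findUserIdx : List (String × Option String) → Nat → Option Nat
  | [], _ => none
  | m :: rest, i => if m.1 = "user" then some i else findUserIdx rest (i + 1)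

-- while j < len(msgs) and msgs[j].role == 'assistant': append safe_text(content)
def collectAssist : List (String × Option String) → List String
  | [] => []
  | m :: rest => if m.1 = "assistant" then safe_text m.2 :: collectAssist rest else []

def extract_first_qa_from_session (session : List (String × List (List (String × String)))) : String × String :=
  let messages := (List.lookup "messages" session).getD []
  let msgs0 := messages.map (fun m => (roleOf m, List.lookup "content" m))
  let msgs := match msgs0 with
    | m :: rest => if m.1 = "assistant" then rest else msgs0
    | [] => msgs0
  match findUserIdx msgs 0 with
  | none => ("", "")
  | some user_idx =>
      let user_q := safe_text (((PySem.List.pyGet? msgs (Int.ofNat user_idx)).map (·.2)).getD none)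
      let assistant_parts := collectAssist (msgs.drop (user_idx + 1))
      (user_q, PySem.Str.join " " (assistant_parts.filter (fun p => p ≠ "")))

-- ===== PORT B =====
-- single pass; state = (found user question or not, accumulated non-empty assistant parts)
def altLoop : List (List (String × String)) → Option String → List String → String × String
  | [], none, _ => ("", "")
  | [], some q, parts => (q, PySem.Str.join " " parts)
  | m :: rest, none, parts =>
      if roleOf m = "user" then altLoop rest (some (safe_text (List.lookup "content" m))) parts
      else altLoop rest none parts
  | m :: rest, some q, parts =>
      if roleOf m = "assistant" then
        let t := safe_text (List.lookup "content" m)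
        altLoop rest (some q) (if t ≠ "" then parts ++ [t] else parts)
      else (q, PySem.Str.join " " parts)

def extract_first_qa_from_session_alt (session : List (String × List (List (String × String)))) : String × String :=
  altLoop ((List.lookup "messages" session).getD []) none []

-- ===== PRECONDITION & SPEC =====
def Spec_extract_first_qa_from_session (session : List (String × List (List (String × String)))) (out : String × String) : Prop := out = extract_first_qa_from_session_alt session
instance (session : List (String × List (List (String × String)))) (out : String × String) : Decidable (Spec_extract_first_qa_from_session session out) := by unfold Spec_extract_first_qa_from_session; infer_instance

-- ===== CLAIM (what is proved, stated in full; the proofs are below) =====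
def Claim_equal_extract_first_qa_from_session : Prop := ∀ (session : List (String × List (List (String × String)))), Dom_extract_first_qa_from_session session → Spec_extract_first_qa_from_session session (extract_first_qa_from_session session)

-- ===== LEMMAS AND PROOFS =====

-- A's find-then-collect pipeline, written structurally (proof device)
def procA : List (String × Option String) → String × String
  | [] => ("", "")
  | m :: rest =>
      if m.1 = "user" then
        (safe_text m.2, PySem.Str.join " " ((collectAssist rest).filter (fun p => p ≠ "")))
      else procA rest

theorem findUserIdx_shift (l : List (String × Option String)) (k : Nat) :
    findUserIdx l k = (findUserIdx l 0).map (k + ·) := by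
  induction l generalizing k with
  | nil => rfl
  | cons m rest ih =>
      simp only [findUserIdx]
      split
      · rfl
      · rw [ih (k + 1), ih 1]
        cases findUserIdx rest 0
        · simp
        · simp; omega

theorem afterFind_eq_procA (l : List (String × Option String)) :
    (match findUserIdx l 0 with
     | none => (("", "") : String × String)
     | some i =>
        (safe_text (((PySem.List.pyGet? l (Int.ofNat i)).map (·.2)).getD none),
         PySem.Str.join " " ((collectAssist (l.drop (i + 1))).filter (fun p => p ≠ "")))) = procA l := by
  induction l with
  | nil => rfl
  | cons m rest ih =>
      by_cases h : m.1 = "user"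
      · simp [findUserIdx, h, procA, PySem.List.pyGet?, PySem.List.pyIdx?]
      · simp only [findUserIdx, h, if_false, procA, findUserIdx_shift rest 1]
        rw [← ih]
        cases hf : findUserIdx rest 0 with
        | none => simp
        | some i =>
            simp only [Option.map_some]
            have h1 : PySem.List.pyGet? (m :: rest) (Int.ofNat (1 + i)) = PySem.List.pyGet? rest (Int.ofNat i) := by
              have : (1 + i) = i + 1 := by omega
              rw [this]
              simp [PySem.List.pyGet?_natCast]
            have h2 : (m :: rest).drop (1 + i + 1) = rest.drop (i + 1) := by
              have : (1 + i + 1) = (i + 1) + 1 := by omega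
              rw [this]; rfl
            rw [h1, h2]

theorem procA_drop_assistant (m : String × Option String) (rest : List (String × Option String))
    (h : m.1 = "assistant") : procA (m :: rest) = procA rest := by
  have : m.1 ≠ "user" := by rw [h]; decide
  simp [procA, this]

theorem altLoop_some (rest : List (List (String × String))) (q : String) (parts : List String) :
    altLoop rest (some q) parts =
      (q, PySem.Str.join " " (parts ++ (collectAssist (rest.map (fun m => (roleOf m, List.lookup "content" m)))).filter (fun p => p ≠ ""))) := by
  induction rest generalizing parts with
  | nil => simp [altLoop, collectAssist]
  | cons m rest ih =>
      by_cases h : roleOf m = "assistant"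
      · simp only [altLoop, if_true, ih, List.map_cons, collectAssist, h, List.filter]
        by_cases ht : safe_text (List.lookup "content" m) = ""
        · simp [ht]
        · simp [ht, List.append_assoc]
      · simp [altLoop, h, List.map_cons, collectAssist]

theorem altLoop_none (ms : List (List (String × String))) :
    altLoop ms none [] = procA (ms.map (fun m => (roleOf m, List.lookup "content" m))) := by
  induction ms with
  | nil => rfl
  | cons m rest ih =>
      by_cases h : roleOf m = "user"
      · simp [altLoop, h, procA, altLoop_some]
      · simp [altLoop, h, procA, ih]

theorem main_aux (nm : List (String × Option String)) :
    (match findUserIdx (match nm with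
        | m :: rest => if m.1 = "assistant" then rest else nm
        | [] => nm) 0 with
     | none => (("", "") : String × String)
     | some user_idx =>
        (safe_text (((PySem.List.pyGet? (match nm with
            | m :: rest => if m.1 = "assistant" then rest else nm
            | [] => nm) (Int.ofNat user_idx)).map (·.2)).getD none),
         PySem.Str.join " " ((collectAssist ((match nm with
            | m :: rest => if m.1 = "assistant" then rest else nm
            | [] => nm).drop (user_idx + 1))).filter (fun p => p ≠ "")))) = procA nm := by
  cases nm with
  | nil => exact afterFind_eq_procA []
  | cons x rest =>
      by_cases hx : x.1 = "assistant"
      · dsimp only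
        rw [if_pos hx]
        exact (afterFind_eq_procA rest).trans (procA_drop_assistant x rest hx).symm
      · dsimp only
        rw [if_neg hx]
        exact afterFind_eq_procA (x :: rest)

-- ===== VERDICT (by name: the statement is the Claim_ definition above) =====
theorem extract_first_qa_from_session_spec : Claim_equal_extract_first_qa_from_session := by
  intro session _
  unfold Spec_extract_first_qa_from_session extract_first_qa_from_session extract_first_qa_from_session_alt
  rw [altLoop_none]
  exact main_aux _
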